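-- pv_equiv track=rewrite | github.com/quarthaz/Earnings-Prediction | functions.py | num_to_cik
-- ===== SOURCE A (Python) =====
-- def num_to_cik(num_list):
--     newlist = []
--     for i in num_list:
--         if len(str(i))==4:
--             newlist.append('companyfacts/CIK000000' + str(i)+'.json')
--         if len(str(i))==5:
--             newlist.append('companyfacts/CIK00000' + str(i)+'.json')
--         if len(str(i))==6:
--             newlist.append('companyfacts/CIK0000' + str(i)+'.json')
--         if len(str(i))==7:
--             newlist.append('companyfacts/CIK000' + str(i)+'.json')
--     return newlist
-- ===== SOURCE B (Python) =====
-- def num_to_cik(num_list):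
--     return ['companyfacts/CIK' + str(i).rjust(10, '0') + '.json'
--             for i in num_list if 4 <= len(str(i)) <= 7]
-- ===== Notes on version B (the rewrite author's own statement) =====
-- stated objective: simpler
-- what changed: Replaces the four length-specific if-branches and the append-accumulator loop with a single comprehension: filter on 4 <= len(str(i)) <= 7 and left-pad str(i) to width 10 in closed form with rjust.
import Mathlib
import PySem

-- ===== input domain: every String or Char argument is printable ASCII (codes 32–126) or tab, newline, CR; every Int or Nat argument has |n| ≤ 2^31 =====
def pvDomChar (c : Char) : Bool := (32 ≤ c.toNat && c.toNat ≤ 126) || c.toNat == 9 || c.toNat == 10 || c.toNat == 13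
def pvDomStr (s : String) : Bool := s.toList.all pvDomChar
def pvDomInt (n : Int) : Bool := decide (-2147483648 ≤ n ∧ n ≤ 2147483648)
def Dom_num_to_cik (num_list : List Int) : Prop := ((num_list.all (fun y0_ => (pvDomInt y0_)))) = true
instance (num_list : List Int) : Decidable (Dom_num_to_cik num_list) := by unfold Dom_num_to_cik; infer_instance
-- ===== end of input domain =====

-- B replaces A's four length-specific branches with one filter + closed-form left-pad (objective: simpler).


-- ===== PORT A =====
-- one loop iteration: the four sequential 'if len(str(i))==k' branches, each appending
def pvStepA (acc : List String) (i : Int) : List String :=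
  let s := PySem.Int.toChars i
  let acc := if s.length = 4 then acc ++ [String.mk ("companyfacts/CIK000000".toList ++ s ++ ".json".toList)] else acc
  let acc := if s.length = 5 then acc ++ [String.mk ("companyfacts/CIK00000".toList ++ s ++ ".json".toList)] else acc
  let acc := if s.length = 6 then acc ++ [String.mk ("companyfacts/CIK0000".toList ++ s ++ ".json".toList)] else acc
  let acc := if s.length = 7 then acc ++ [String.mk ("companyfacts/CIK000".toList ++ s ++ ".json".toList)] else acc
  acc

def num_to_cik (num_list : List Int) : List String :=
  num_list.foldl pvStepA []

-- ===== PORT B =====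
-- str(i).rjust(10, '0') : left-pad with '0' to width 10 (no sign handling)
def pvPad10 (s : List Char) : List Char := List.replicate (10 - s.length) '0' ++ s

def num_to_cik_alt (num_list : List Int) : List String :=
  (num_list.filter (fun i =>
      let n := (PySem.Int.toChars i).length
      decide (4 ≤ n ∧ n ≤ 7))).map (fun i =>
    String.mk ("companyfacts/CIK".toList ++ pvPad10 (PySem.Int.toChars i) ++ ".json".toList))

-- ===== PRECONDITION & SPEC =====
def Spec_num_to_cik (num_list : List Int) (out : List String) : Prop := out = num_to_cik_alt num_list
instance (num_list : List Int) (out : List String) : Decidable (Spec_num_to_cik num_list out) := by unfold Spec_num_to_cik; infer_instance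

-- ===== CLAIM (what is proved, stated in full; the proofs are below) =====
def Claim_equal_num_to_cik : Prop := ∀ (num_list : List Int), Dom_num_to_cik num_list → Spec_num_to_cik num_list (num_to_cik num_list)

-- ===== LEMMAS AND PROOFS =====
-- one element contributed to the output, expressed B's way
def pvEmit (i : Int) : List String :=
  let n := (PySem.Int.toChars i).length
  if 4 ≤ n ∧ n ≤ 7 then
    [String.mk ("companyfacts/CIK".toList ++ pvPad10 (PySem.Int.toChars i) ++ ".json".toList)]
  else []

theorem pvStepA_emit (acc : List String) (i : Int) :
    pvStepA acc i = acc ++ pvEmit i := by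
  unfold pvStepA pvEmit pvPad10
  set s := PySem.Int.toChars i with hs
  by_cases h4 : s.length = 4
  · simp [h4]
  · by_cases h5 : s.length = 5
    · simp [h5]
    · by_cases h6 : s.length = 6
      · simp [h4, h6]
      · by_cases h7 : s.length = 7
        · simp [h4, h7]
        · have : ¬ (4 ≤ s.length ∧ s.length ≤ 7) := by omega
          simp [h4, h5, h6, h7, this]

theorem pvFold_emit : ∀ (l : List Int) (acc : List String),
    l.foldl pvStepA acc = acc ++ l.flatMap pvEmit := by
  intro l
  induction l with
  | nil => simp
  | cons i t ih => intro acc; simp [List.foldl, pvStepA_emit, ih, List.flatMap_cons]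

theorem pvAlt_flatMap (l : List Int) : num_to_cik_alt l = l.flatMap pvEmit := by
  unfold num_to_cik_alt
  induction l with
  | nil => simp
  | cons i t ih =>
    simp only [List.flatMap_cons]
    by_cases h : 4 ≤ (PySem.Int.toChars i).length ∧ (PySem.Int.toChars i).length ≤ 7
    · simp [h, pvEmit] at ih ⊢
      exact ih
    · simp [h, pvEmit] at ih ⊢
      exact ih

-- ===== VERDICT (by name: the statement is the Claim_ definition above) =====
theorem num_to_cik_spec : Claim_equal_num_to_cik := by
  intro l _
  unfold Spec_num_to_cik num_to_cik
  rw [pvFold_emit, pvAlt_flatMap]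
  simp
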